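-- pv_equiv track=rewrite | github.com/samodostal/AOC | 2023/12/12.py | counts_correspond_to_template_fully
-- ===== SOURCE A (Python) =====
-- def counts_correspond_to_template_fully(template, counts):
--     template_counts = []
--     current_count = 0
--
--     for ch in template:
--         if ch == "#":
--             current_count += 1
--         elif current_count != 0:
--             template_counts.append(current_count)
--             current_count = 0
--
--     if current_count != 0:
--         template_counts.append(current_count)
--
--     return template_counts == counts
-- ===== SOURCE B (Python) =====
-- def counts_correspond_to_template_fully(template, counts):
--     # Map every non-'#' char to a space, then let str.split() extract the
--     # maximal '#' runs in one pass; compare their lengths to counts.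
--     normalized = ''.join(ch if ch == '#' else ' ' for ch in template)
--     return [len(run) for run in normalized.split()] == counts
-- ===== Notes on version B (the rewrite author's own statement) =====
-- stated objective: idiomatic
-- what changed: Replaces the manual current_count state machine with end-of-string flush by normalizing non-'#' chars to spaces and using str.split() to extract maximal '#' runs, comparing their lengths to counts.
import Mathlib
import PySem

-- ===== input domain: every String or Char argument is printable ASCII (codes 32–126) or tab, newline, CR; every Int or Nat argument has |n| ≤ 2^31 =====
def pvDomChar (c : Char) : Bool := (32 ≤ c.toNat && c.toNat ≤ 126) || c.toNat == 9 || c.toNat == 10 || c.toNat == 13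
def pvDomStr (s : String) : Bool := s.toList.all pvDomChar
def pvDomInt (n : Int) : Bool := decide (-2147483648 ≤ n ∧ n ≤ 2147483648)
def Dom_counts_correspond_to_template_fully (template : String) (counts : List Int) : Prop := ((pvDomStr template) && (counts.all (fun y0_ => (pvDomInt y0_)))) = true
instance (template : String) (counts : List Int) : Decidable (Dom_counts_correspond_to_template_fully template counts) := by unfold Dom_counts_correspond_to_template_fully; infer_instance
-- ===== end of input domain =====

-- B replaces A's manual run-length accumulator with a normalize-then-split() extraction of the '#' runs (idiomatic, same cost).

-- ===== PORT A =====
def counts_correspond_to_template_fully (template : String) (counts : List Int) : Bool :=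
  -- state = (template_counts, current_count)
  let st := template.toList.foldl
    (fun (st : List Int × Int) ch =>
      if ch == '#' then (st.1, st.2 + 1)
      else if st.2 != 0 then (st.1 ++ [st.2], (0 : Int))
      else st) ([], 0)
  let tc := if st.2 != 0 then st.1 ++ [st.2] else st.1
  tc == counts

-- ===== PORT B =====
def counts_correspond_to_template_fully_alt (template : String) (counts : List Int) : Bool :=
  -- normalized = ''.join(ch if ch == '#' else ' ' for ch in template)
  let normalized := template.toList.map (fun ch => if ch == '#' then ch else ' ')
  -- [len(run) for run in normalized.split()] == counts
  ((PySem.Chars.split₀ normalized).map (fun run => PySem.Chars.len run)) == counts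

-- ===== PRECONDITION & SPEC =====
def Spec_counts_correspond_to_template_fully (template : String) (counts : List Int) (out : Bool) : Prop := out = counts_correspond_to_template_fully_alt template counts
instance (template : String) (counts : List Int) (out : Bool) : Decidable (Spec_counts_correspond_to_template_fully template counts out) := by unfold Spec_counts_correspond_to_template_fully; infer_instance

-- ===== CLAIM (what is proved, stated in full; the proofs are below) =====
def Claim_equal_counts_correspond_to_template_fully : Prop := ∀ (template : String) (counts : List Int), Dom_counts_correspond_to_template_fully template counts → Spec_counts_correspond_to_template_fully template counts (counts_correspond_to_template_fully template counts)

-- ===== LEMMAS AND PROOFS =====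

-- reference run-length list: aRun cs cc = the counts A appends while scanning cs with open run cc
def aRun : List Char → Int → List Int
  | [], cc => if cc ≠ 0 then [cc] else []
  | c :: cs, cc =>
    if c = '#' then aRun cs (cc + 1)
    else if cc ≠ 0 then cc :: aRun cs 0
    else aRun cs 0

theorem foldA (cs : List Char) : ∀ (tc : List Int) (cc : Int),
    (let st := cs.foldl
      (fun (st : List Int × Int) ch =>
        if ch == '#' then (st.1, st.2 + 1)
        else if st.2 != 0 then (st.1 ++ [st.2], (0 : Int))
        else st) (tc, cc);
     if st.2 != 0 then st.1 ++ [st.2] else st.1) = tc ++ aRun cs cc := by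
  induction cs with
  | nil =>
      intro tc cc
      simp only [List.foldl, aRun]
      by_cases h : cc = 0 <;> simp [h]
  | cons c cs ih =>
      intro tc cc
      by_cases hc : c = '#'
      · simpa [List.foldl, aRun, hc] using ih tc (cc + 1)
      · by_cases hcc : cc = 0
        · simpa [List.foldl, aRun, hc, hcc] using ih tc cc
        · simpa [List.foldl, aRun, hc, hcc, List.append_assoc] using ih (tc ++ [cc]) 0

theorem goB (cs : List Char) : ∀ (cur : List Char) (acc : List (List Char)),
    (PySem.Chars.split₀.go (cs.map (fun ch => if ch == '#' then ch else ' ')) cur acc).map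
        (fun run => PySem.Chars.len run)
      = acc.reverse.map (fun run => PySem.Chars.len run) ++ aRun cs (cur.length : Int) := by
  induction cs with
  | nil =>
      intro cur acc
      by_cases h : cur = [] <;>
        simp [PySem.Chars.split₀.go, aRun, h, List.length_eq_zero_iff]
  | cons c cs ih =>
      intro cur acc
      by_cases hc : c = '#'
      · have hsp : PySem.Chars.isspace '#' = false := by decide
        simpa [List.map, hc, PySem.Chars.split₀.go, hsp, aRun, add_comm] using
          ih ('#' :: cur) acc
      · have hsp : PySem.Chars.isspace ' ' = true := by decide
        by_cases h : cur = []
        · simpa [List.map, hc, h, PySem.Chars.split₀.go, hsp, aRun] using ih [] acc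
        · have hlen : ¬ ((cur.length : Int) = 0) := by
            simp [List.length_eq_zero_iff]; exact h
          simpa [List.map, hc, h, PySem.Chars.split₀.go, hsp, aRun, hlen,
            List.append_assoc] using ih [] (cur.reverse :: acc)

-- ===== VERDICT (by name: the statement is the Claim_ definition above) =====
theorem counts_correspond_to_template_fully_spec : Claim_equal_counts_correspond_to_template_fully := by
  intro template counts _
  unfold Spec_counts_correspond_to_template_fully
  unfold counts_correspond_to_template_fully counts_correspond_to_template_fully_alt
  unfold PySem.Chars.split₀
  have hA := foldA template.toList [] 0
  have hB := goB template.toList [] []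
  simp only [List.length_nil, Int.natCast_zero, List.reverse_nil, List.map_nil,
    List.nil_append] at hA hB
  simp only [hA, hB]
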